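-- pv_equiv track=rewrite | github.com/ThomasXIONG151215/acfpp | show_optimize.py | time_range
-- ===== SOURCE A (Python) =====
-- def time_range(on_times,off_times):#提取具体什么时候开空调什么时候不开空调
--     accumulate_time = 0
--     on_pivots = []
--     off_pivots = []
--     for ont,offt in zip(on_times,off_times):
--         on_pivots.append((accumulate_time,accumulate_time+ont))
--         accumulate_time += ont
--         off_pivots.append((accumulate_time,accumulate_time+offt))
--         accumulate_time += offt
--     return on_pivots,off_pivots
-- ===== SOURCE B (Python) =====
-- def time_range(on_times, off_times):
--     # Interleave durations, build a prefix-sum boundary table, then slice out intervals.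
--     inter = [d for pair in zip(on_times, off_times) for d in pair]
--     boundaries = [0]
--     s = 0
--     for d in inter:
--         s += d
--         boundaries.append(s)
--     n = len(inter) // 2
--     on_pivots = [(boundaries[2 * i], boundaries[2 * i + 1]) for i in range(n)]
--     off_pivots = [(boundaries[2 * i + 1], boundaries[2 * i + 2]) for i in range(n)]
--     return on_pivots, off_pivots
-- ===== Notes on version B (the rewrite author's own statement) =====
-- stated objective: alternative
-- what changed: B replaces A's single accumulator loop that appends to both output lists with a two-phase decomposition: interleave the durations, build a prefix-sum boundary table, then extract the on/off intervals by index in a separate pass.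
import Mathlib
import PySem

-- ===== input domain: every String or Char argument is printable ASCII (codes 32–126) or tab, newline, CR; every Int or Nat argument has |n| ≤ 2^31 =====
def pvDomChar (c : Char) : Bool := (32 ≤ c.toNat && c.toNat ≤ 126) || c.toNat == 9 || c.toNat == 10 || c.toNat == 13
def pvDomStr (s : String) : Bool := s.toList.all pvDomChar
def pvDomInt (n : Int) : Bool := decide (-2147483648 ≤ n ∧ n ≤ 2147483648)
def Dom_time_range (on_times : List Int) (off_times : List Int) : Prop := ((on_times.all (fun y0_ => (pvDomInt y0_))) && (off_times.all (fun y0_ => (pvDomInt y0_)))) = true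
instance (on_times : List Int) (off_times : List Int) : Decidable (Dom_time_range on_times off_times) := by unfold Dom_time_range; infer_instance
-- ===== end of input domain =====

-- B builds a prefix-sum boundary table from the interleaved durations and extracts the
-- intervals by index in a second pass, instead of A's single accumulator loop (objective: alternative).


-- ===== PORT A =====
-- single loop over zip, carrying (accumulate_time, on_pivots, off_pivots)
def time_range (on_times : List Int) (off_times : List Int) : (List (Int × Int)) × (List (Int × Int)) :=
  let st := (List.zip on_times off_times).foldl
    (fun (st : Int × List (Int × Int) × List (Int × Int)) p =>
      let a := st.1
      let onp := st.2.1 ++ [(a, a + p.1)]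
      let a := a + p.1
      let offp := st.2.2 ++ [(a, a + p.2)]
      (a + p.2, onp, offp))
    (0, [], [])
  (st.2.1, st.2.2)

-- ===== PORT B =====
-- phase 1: interleave; phase 2: running-sum boundary table; phase 3: extract by index
def time_range_alt (on_times : List Int) (off_times : List Int) : (List (Int × Int)) × (List (Int × Int)) :=
  let inter := (List.zip on_times off_times).flatMap (fun p => [p.1, p.2])
  let sb := inter.foldl (fun (sb : Int × List Int) d => (sb.1 + d, sb.2 ++ [sb.1 + d])) (0, [0])
  let boundaries := sb.2
  let n := inter.length / 2
  let on_pivots := (List.range n).map (fun i => (boundaries.getD (2 * i) 0, boundaries.getD (2 * i + 1) 0))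
  let off_pivots := (List.range n).map (fun i => (boundaries.getD (2 * i + 1) 0, boundaries.getD (2 * i + 2) 0))
  (on_pivots, off_pivots)

-- ===== PRECONDITION & SPEC =====
def Spec_time_range (on_times : List Int) (off_times : List Int) (out : (List (Int × Int)) × (List (Int × Int))) : Prop := out = time_range_alt on_times off_times
instance (on_times : List Int) (off_times : List Int) (out : (List (Int × Int)) × (List (Int × Int))) : Decidable (Spec_time_range on_times off_times out) := by unfold Spec_time_range; infer_instance

-- ===== CLAIM (what is proved, stated in full; the proofs are below) =====
def Claim_equal_time_range : Prop := ∀ (on_times : List Int) (off_times : List Int), Dom_time_range on_times off_times → Spec_time_range on_times off_times (time_range on_times off_times)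

-- ===== LEMMAS AND PROOFS =====

-- reference interval lists, by structural recursion on the zipped pairs
def pivOn (a : Int) : List (Int × Int) → List (Int × Int)
  | [] => []
  | (x, y) :: z => (a, a + x) :: pivOn (a + x + y) z

def pivOff (a : Int) : List (Int × Int) → List (Int × Int)
  | [] => []
  | (x, y) :: z => (a + x, a + x + y) :: pivOff (a + x + y) z

-- final accumulator of A's fold
def accFin (a : Int) : List (Int × Int) → Int
  | [] => a
  | (x, y) :: z => accFin (a + x + y) z

theorem foldA_eq (z : List (Int × Int)) : ∀ (a : Int) (onp offp : List (Int × Int)),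
    z.foldl (fun (st : Int × List (Int × Int) × List (Int × Int)) p =>
      let a := st.1
      let onp := st.2.1 ++ [(a, a + p.1)]
      let a := a + p.1
      let offp := st.2.2 ++ [(a, a + p.2)]
      (a + p.2, onp, offp)) (a, onp, offp)
    = (accFin a z, onp ++ pivOn a z, offp ++ pivOff a z) := by
  induction z with
  | nil => intro a onp offp; simp [accFin, pivOn, pivOff]
  | cons p z ih =>
    intro a onp offp
    obtain ⟨x, y⟩ := p
    simp only [List.foldl_cons, ih, pivOn, pivOff, accFin, List.append_assoc]
    simp [add_assoc]

-- running-sum scan as structural recursion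
def scanSum (a : Int) : List Int → List Int
  | [] => [a]
  | d :: ds => a :: scanSum (a + d) ds

theorem foldB_eq (ds : List Int) : ∀ (s : Int) (bs : List Int),
    ds.foldl (fun (sb : Int × List Int) d => (sb.1 + d, sb.2 ++ [sb.1 + d])) (s, bs)
    = (s + ds.sum, bs ++ (scanSum s ds).tail) := by
  induction ds with
  | nil => intro s bs; simp [scanSum]
  | cons d ds ih =>
    intro s bs
    simp only [List.foldl_cons, ih, scanSum, List.sum_cons]
    rw [Prod.mk.injEq]
    refine ⟨by ring, ?_⟩
    rw [List.append_assoc]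
    congr 1
    cases ds <;> simp [scanSum]

theorem scanSum_getD_shift (a d₁ d₂ : Int) (ds : List Int) (k m : ℕ) (h : k = m + 2) :
    (scanSum a (d₁ :: d₂ :: ds)).getD k 0 = (scanSum (a + d₁ + d₂) ds).getD m 0 := by
  subst h; simp [scanSum]

theorem extract_eq (z : List (Int × Int)) : ∀ (a : Int),
    ((List.range z.length).map (fun i =>
        ((scanSum a (z.flatMap fun p => [p.1, p.2])).getD (2 * i) 0,
         (scanSum a (z.flatMap fun p => [p.1, p.2])).getD (2 * i + 1) 0)) = pivOn a z)
    ∧ ((List.range z.length).map (fun i =>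
        ((scanSum a (z.flatMap fun p => [p.1, p.2])).getD (2 * i + 1) 0,
         (scanSum a (z.flatMap fun p => [p.1, p.2])).getD (2 * i + 2) 0)) = pivOff a z) := by
  induction z with
  | nil => intro a; simp [pivOn, pivOff]
  | cons p z ih =>
    intro a
    obtain ⟨x, y⟩ := p
    have hr : List.range (z.length + 1) = 0 :: (List.range z.length).map Nat.succ :=
      List.range_succ_eq_map
    have hflat : ((x, y) :: z).flatMap (fun p => [p.1, p.2])
        = x :: y :: z.flatMap (fun p => [p.1, p.2]) := by simp
    have hOnTail : (List.range z.length).map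
        ((fun i => ((scanSum a (x :: y :: z.flatMap fun p => [p.1, p.2])).getD (2 * i) 0,
                    (scanSum a (x :: y :: z.flatMap fun p => [p.1, p.2])).getD (2 * i + 1) 0)) ∘ Nat.succ)
        = pivOn (a + x + y) z := by
      rw [← (ih (a + x + y)).1]
      apply List.map_congr_left
      intro i _
      simp only [Function.comp_apply]
      rw [scanSum_getD_shift a x y _ _ (2 * i) (by omega),
          scanSum_getD_shift a x y _ _ (2 * i + 1) (by omega)]
    have hOffTail : (List.range z.length).map
        ((fun i => ((scanSum a (x :: y :: z.flatMap fun p => [p.1, p.2])).getD (2 * i + 1) 0,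
                    (scanSum a (x :: y :: z.flatMap fun p => [p.1, p.2])).getD (2 * i + 2) 0)) ∘ Nat.succ)
        = pivOff (a + x + y) z := by
      rw [← (ih (a + x + y)).2]
      apply List.map_congr_left
      intro i _
      simp only [Function.comp_apply]
      rw [scanSum_getD_shift a x y _ _ (2 * i + 1) (by omega),
          scanSum_getD_shift a x y _ _ (2 * i + 2) (by omega)]
    constructor
    · rw [List.length_cons, hr, List.map_cons, List.map_map, hflat]
      simp only [pivOn, List.cons.injEq]
      refine ⟨by simp [scanSum], hOnTail⟩
    · rw [List.length_cons, hr, List.map_cons, List.map_map, hflat]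
      simp only [pivOff, List.cons.injEq]
      refine ⟨?_, hOffTail⟩
      cases List.flatMap (fun p => [p.1, p.2]) z <;> simp [scanSum]

theorem flatMap_length (z : List (Int × Int)) :
    (z.flatMap fun p => [p.1, p.2]).length = 2 * z.length := by
  induction z with
  | nil => simp
  | cons p z ih => simp [ih]; omega

-- ===== VERDICT (by name: the statement is the Claim_ definition above) =====
theorem time_range_spec : Claim_equal_time_range := by
  intro on_times off_times _
  unfold Spec_time_range time_range time_range_alt
  set z := List.zip on_times off_times with hz
  rw [foldA_eq]
  have hb := foldB_eq (z.flatMap fun p => [p.1, p.2]) 0 [0]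
  simp only [hb]
  have hbs : ([0] : List Int) ++ (scanSum 0 (z.flatMap fun p => [p.1, p.2])).tail
      = scanSum 0 (z.flatMap fun p => [p.1, p.2]) := by
    cases h : z.flatMap fun p => [p.1, p.2] <;> simp [scanSum]
  simp only [hbs]
  have hn : (z.flatMap fun p => [p.1, p.2]).length / 2 = z.length := by
    rw [flatMap_length]; omega
  simp only [hn]
  rw [Prod.mk.injEq]
  exact ⟨((extract_eq z 0).1).symm, ((extract_eq z 0).2).symm⟩
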